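-- pv_equiv track=rewrite | github.com/boshi-an/PythonClass_PhrasesMining | main_fucked.py | FrequentPhraseDetection
-- ===== SOURCE A (Python) =====
-- import collections
--
-- def FrequentPhraseDetection(Corpus, Threshold, DivideSet) :
-- 	Len = len(Corpus)
-- 	Frequency = collections.defaultdict(int)
-- 	Index  = collections.defaultdict(set)
-- 	for i in range(Len) :
-- 		if Corpus[i] not in DivideSet :
-- 			Index[Corpus[i]].add(i)
-- 	while len(Index) :
-- 		Index_2 = collections.defaultdict(set)
-- 		for CurPhrase in Index :
-- 			if (len(Index[CurPhrase]) >= Threshold) :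
-- 				Frequency[CurPhrase] = len(Index[CurPhrase])
-- 				for Pos in Index[CurPhrase] :
-- 					if (Pos+1 < Len) and (Corpus[Pos+1] not in DivideSet) :
-- 						NxtPhrase = CurPhrase + Corpus[Pos+1]
-- 						Index_2[NxtPhrase].add(Pos+1)
-- 		Index = Index_2
-- 	return Frequency
-- ===== SOURCE B (Python) =====
-- import collections
--
-- def FrequentPhraseDetection(Corpus, Threshold, DivideSet):
--     # Frontier of bare end positions; each level's phrase strings are recomputed
--     # from the corpus by slicing + join instead of being carried through the loop.
--     n = len(Corpus)
--     pairs = []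
--     alive = [p for p in range(n) if Corpus[p] not in DivideSet]
--     L = 1
--     while alive:
--         ws = [''.join(Corpus[p - L + 1 : p + 1]) for p in alive]
--         cnt = collections.Counter(ws)
--         for s in cnt:
--             if cnt[s] >= Threshold:
--                 pairs.append((s, cnt[s]))
--         alive = [p + 1 for s in cnt if cnt[s] >= Threshold
--                  for p, w in zip(alive, ws)
--                  if w == s and p + 1 < n and Corpus[p + 1] not in DivideSet]
--         L += 1
--     return dict(pairs)
-- ===== Notes on version B (the rewrite author's own statement) =====
-- stated objective: alternative
-- what changed: B drops A's phrase-keyed dict-of-position-sets entirely: its only loop state is a flat frontier of bare end positions plus the level number; each level's phrase strings are recomputed from the corpus by slicing and joining, frequencies come from one Counter over those strings, and the surviving shifted positions form the next frontier, with the result dict built once at the end from the emitted (phrase,count) pairs.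
import Mathlib
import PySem

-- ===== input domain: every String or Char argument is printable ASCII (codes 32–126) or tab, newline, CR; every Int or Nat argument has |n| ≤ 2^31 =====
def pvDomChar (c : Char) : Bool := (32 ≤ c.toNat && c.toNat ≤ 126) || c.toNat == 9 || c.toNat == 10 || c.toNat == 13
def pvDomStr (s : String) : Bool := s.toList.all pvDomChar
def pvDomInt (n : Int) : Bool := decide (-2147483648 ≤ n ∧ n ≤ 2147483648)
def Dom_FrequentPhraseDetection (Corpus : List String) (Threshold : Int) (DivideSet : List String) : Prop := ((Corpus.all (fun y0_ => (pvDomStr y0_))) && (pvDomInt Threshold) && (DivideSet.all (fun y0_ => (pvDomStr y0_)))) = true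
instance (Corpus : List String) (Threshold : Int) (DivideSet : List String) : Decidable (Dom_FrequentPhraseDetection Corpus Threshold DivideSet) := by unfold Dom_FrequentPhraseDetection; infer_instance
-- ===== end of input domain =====

-- B replaces A's phrase-keyed dict-of-position-sets by a flat frontier of bare end positions,
-- recomputing each level's phrase strings from the corpus by slicing + joining and building the
-- result dict once at the end (objective: alternative state organization, not claimed faster).
-- Python strings are represented as List Char during the computation (Lean's own String.append is
-- kernel-opaque); both ports wrap keys back with String.ofList at the return boundary.
-- Python A's returned dict content is independent of CPython's set iteration order (only its
-- insertion order varies with it); the ports realize set/dict iteration as insertion order.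

-- ===== PORT A =====
-- the while loop of A as fuel recursion; fuel Corpus.length + 1 always suffices: every position
-- stored in the index at level k is ≥ k - 1 and < Len, so the index is empty after ≤ Len rounds.
def pvALoop (toks divide : List (List Char)) (T : Int) :
    Nat → PySem.Dict (List Char) Int → PySem.Dict (List Char) (PySem.Set Int) → PySem.Dict (List Char) Int
  | 0, freq, _ => freq
  | fuel+1, freq, idx =>
    if idx.size = 0 then freq
    else
      let st := idx.items.foldl
        (fun (st : PySem.Dict (List Char) Int × PySem.Dict (List Char) (PySem.Set Int)) kv =>
          if T ≤ PySem.Set.len kv.2 then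
            (st.1.insert kv.1 (PySem.Set.len kv.2),
             kv.2.foldl
               (fun i2 pos =>
                 if pos + 1 < (toks.length : Int) ∧ PySem.List.pyGetD toks (pos + 1) [] ∉ divide then
                   i2.modify (kv.1 ++ PySem.List.pyGetD toks (pos + 1) []) PySem.Set.empty
                     (fun s => s.add (pos + 1))
                 else i2)
               st.2)
          else st)
        (freq, PySem.Dict.empty)
      pvALoop toks divide T fuel st.1 st.2
def FrequentPhraseDetection (Corpus : List String) (Threshold : Int) (DivideSet : List String) : List (String × Int) :=
  let toks := Corpus.map String.toList
  let divide := DivideSet.map String.toList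
  let index0 : PySem.Dict (List Char) (PySem.Set Int) :=
    (PySem.List.pyRange 0 (toks.length : Int) 1).foldl
      (fun d i =>
        if PySem.List.pyGetD toks i [] ∉ divide then
          d.modify (PySem.List.pyGetD toks i []) PySem.Set.empty (fun s => s.add i)
        else d)
      PySem.Dict.empty
  (pvALoop toks divide Threshold (toks.length + 1) PySem.Dict.empty index0).items.map
    (fun p => (String.ofList p.1, p.2))

-- ===== PORT B =====
-- ''.join(Corpus[p - L + 1 : p + 1]) of Source B: join of a slice of the token list is its flatten
def pvW (toks : List (List Char)) (L : Int) (p : Int) : List Char :=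
  (PySem.List.slice toks (some (p - L + 1)) (some (p + 1))).flatten
-- the while loop of B as fuel recursion; the same fuel bound suffices for the same reason
-- (every frontier position at level L is ≥ L - 1 and < n, so the frontier empties in ≤ n rounds).
def pvBLoop (toks divide : List (List Char)) (T : Int) :
    Nat → List (List Char × Int) → List Int → Int → List (List Char × Int)
  | 0, pairs, _, _ => pairs
  | fuel+1, pairs, alive, L =>
    if alive = [] then pairs
    else
      let ws := alive.map (fun p => pvW toks L p)
      let cnt := PySem.Dict.counter ws
      let pairs' := cnt.keys.foldl
        (fun ps s => if T ≤ cnt.getD s 0 then ps ++ [(s, cnt.getD s 0)] else ps) pairs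
      let alive' := cnt.keys.flatMap
        (fun s =>
          if T ≤ cnt.getD s 0 then
            ((alive.zip ws).filter
              (fun pw => pw.2 == s && decide (pw.1 + 1 < (toks.length : Int)) &&
                         decide (PySem.List.pyGetD toks (pw.1 + 1) [] ∉ divide))).map
              (fun pw => pw.1 + 1)
          else [])
      pvBLoop toks divide T fuel pairs' alive' (L + 1)
def FrequentPhraseDetection_alt (Corpus : List String) (Threshold : Int) (DivideSet : List String) : List (String × Int) :=
  let toks := Corpus.map String.toList
  let divide := DivideSet.map String.toList
  let alive0 : List Int :=
    (PySem.List.pyRange 0 (toks.length : Int) 1).filter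
      (fun p => decide (PySem.List.pyGetD toks p [] ∉ divide))
  let pairs := pvBLoop toks divide Threshold (toks.length + 1) [] alive0 1
  (pairs.foldl (fun d (pr : List Char × Int) => d.insert pr.1 pr.2) PySem.Dict.empty).items.map
    (fun p => (String.ofList p.1, p.2))

-- ===== PRECONDITION & SPEC =====
def Spec_FrequentPhraseDetection (Corpus : List String) (Threshold : Int) (DivideSet : List String) (out : List (String × Int)) : Prop := out = FrequentPhraseDetection_alt Corpus Threshold DivideSet
instance (Corpus : List String) (Threshold : Int) (DivideSet : List String) (out : List (String × Int)) : Decidable (Spec_FrequentPhraseDetection Corpus Threshold DivideSet out) := by unfold Spec_FrequentPhraseDetection; infer_instance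

-- ===== CLAIM (what is proved, stated in full; the proofs are below) =====
def Claim_equal_FrequentPhraseDetection : Prop := ∀ (Corpus : List String) (Threshold : Int) (DivideSet : List String), Dom_FrequentPhraseDetection Corpus Threshold DivideSet → Spec_FrequentPhraseDetection Corpus Threshold DivideSet (FrequentPhraseDetection Corpus Threshold DivideSet)

-- ===== LEMMAS AND PROOFS =====

-- proof-side abbreviations
def pvFl (cur : List (Int × List Char)) (k : List Char) : List (Int × List Char) :=
  cur.filter (fun pr => pr.2 == k)
def pvCnt (cur : List (Int × List Char)) (k : List Char) : Int := ((pvFl cur k).length : Int)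
def pvCnd (toks divide : List (List Char)) (pr : Int × List Char) : Bool :=
  decide (pr.1 + 1 < (toks.length : Int) ∧ PySem.List.pyGetD toks (pr.1 + 1) [] ∉ divide)
def pvExt (toks : List (List Char)) (k : List Char) (pr : Int × List Char) : Int × List Char :=
  (pr.1 + 1, k ++ PySem.List.pyGetD toks (pr.1 + 1) [])
def pvBrs (toks divide : List (List Char)) (T : Int) (cur : List (Int × List Char)) (k : List Char) :
    List (Int × List Char) :=
  if T ≤ pvCnt cur k then ((pvFl cur k).filter (pvCnd toks divide)).map (pvExt toks k) else []
def pvNext (toks divide : List (List Char)) (T : Int) (cur : List (Int × List Char)) :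
    List (Int × List Char) :=
  (PySem.Set.ofList (cur.map (fun pr => pr.2))).flatMap (pvBrs toks divide T cur)
def pvGroup (cur : List (Int × List Char)) : PySem.Dict (List Char) (PySem.Set Int) :=
  cur.foldl (fun d pr => d.modify pr.2 PySem.Set.empty (fun s => s.add pr.1)) PySem.Dict.empty
def pvIns (d : PySem.Dict (List Char) Int) (pr : List Char × Int) : PySem.Dict (List Char) Int :=
  d.insert pr.1 pr.2
def pvCur (toks : List (List Char)) (L : Int) (alive : List Int) : List (Int × List Char) :=
  alive.map (fun p => (p, pvW toks L p))

theorem pv_foldl_modify_items {κ ν β : Type} [BEq κ] [LawfulBEq κ] (key : β → κ) (e : ν)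
    (upd : ν → β → ν) (l : List β) :
    (l.foldl (fun d x => PySem.Dict.modify d (key x) e (fun v => upd v x)) PySem.Dict.empty).items
      = (PySem.Set.ofList (l.map key)).map
          (fun k => (k, (l.filter (fun x => key x == k)).foldl upd e)) := by
  induction l using List.reverseRecOn with
  | nil => rfl
  | append_singleton l x ih =>
    rw [List.foldl_append, List.foldl_cons, List.foldl_nil]
    set D := l.foldl (fun d x => PySem.Dict.modify d (key x) e (fun v => upd v x)) PySem.Dict.empty with hD
    have hkeys : D.keys = PySem.Set.ofList (l.map key) := by
      unfold PySem.Dict.keys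
      rw [ih, List.map_map]
      exact List.map_id' _
    have hnk : D.keys.Nodup := by rw [hkeys]; exact PySem.Set.nodup_ofList _
    rw [List.map_append]
    simp only [List.map_cons, List.map_nil]
    rw [PySem.Set.ofList_append_singleton]
    by_cases hm : key x ∈ l.map key
    · -- existing key
      have hmK : key x ∈ PySem.Set.ofList (l.map key) := (PySem.Set.mem_ofList _ _).mpr hm
      have hc : D.contains (key x) = true := by
        rw [PySem.Dict.contains_iff_mem_keys, hkeys]; exact hmK
      have hgd : D.getD (key x) e = (l.filter (fun y => key y == key x)).foldl upd e := by
        apply PySem.Dict.getD_of_mem_items _ _ hnk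
        rw [ih]
        exact List.mem_map.mpr ⟨key x, hmK, rfl⟩
      rw [show PySem.Dict.modify D (key x) e (fun v => upd v x)
            = D.insert (key x) (upd (D.getD (key x) e) x) from rfl]
      rw [PySem.Dict.items_insert_of_contains _ _ hc, ih, List.map_map,
        PySem.Set.add_of_mem hmK]
      apply List.map_congr_left
      intro k hk
      by_cases hkx : k = key x
      · subst hkx
        simp only [Function.comp, BEq.rfl, if_pos]
        rw [hgd, List.filter_append]
        simp
      · have : (k == key x) = false := by simp [hkx]
        simp only [Function.comp, this, Bool.false_eq_true, if_neg, not_false_iff]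
        rw [List.filter_append]
        have : List.filter (fun y => key y == k) [x] = [] := by
          simp [List.filter_cons]
          intro h; exact absurd h.symm hkx
        rw [this, List.append_nil]
    · -- new key
      have hmK : key x ∉ PySem.Set.ofList (l.map key) := fun h => hm ((PySem.Set.mem_ofList _ _).mp h)
      have hc : D.contains (key x) = false := by
        rw [Bool.eq_false_iff]
        intro h
        exact hmK (by rw [← hkeys]; exact (PySem.Dict.contains_iff_mem_keys _ _).mp h)
      have hgd : D.getD (key x) e = e := PySem.Dict.getD_of_not_contains _ _ hc
      rw [show PySem.Dict.modify D (key x) e (fun v => upd v x)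
            = D.insert (key x) (upd (D.getD (key x) e) x) from rfl]
      rw [PySem.Dict.items_insert_of_not_contains _ _ hc, ih, hgd,
        PySem.Set.add_of_not_mem hmK, List.map_append]
      congr 1
      · apply List.map_congr_left
        intro k hk
        have hkx : k ≠ key x := by
          intro h; subst h; exact hmK hk
        have : List.filter (fun y => key y == k) [x] = [] := by
          simp [List.filter_cons]
          intro h; exact absurd h.symm hkx
        rw [List.filter_append, this, List.append_nil]
      · simp only [List.map_cons, List.map_nil]
        rw [List.filter_append]
        have h1 : List.filter (fun y => key y == key x) l = [] := by
          rw [List.filter_eq_nil_iff]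
          intro a ha h
          exact hm (by rw [← (beq_iff_eq ..).mp h]; exact List.mem_map_of_mem ha)
        simp [h1]

theorem pv_foldl_add_of_nodup {α β : Type} [BEq α] [LawfulBEq α] (f : β → α) (l : List β)
    (h : (l.map f).Nodup) :
    l.foldl (fun s b => PySem.Set.add s (f b)) PySem.Set.empty = l.map f := by
  rw [← PySem.Set.update_map_eq_foldl_add]
  rw [show PySem.Set.update PySem.Set.empty (l.map f) = PySem.Set.ofList (l.map f) from
    PySem.Set.update_empty _]
  exact PySem.Set.ofList_eq_self_of_nodup _ h

theorem pv_fl_map_fst_nodup (cur : List (Int × List Char)) (h : (cur.map Prod.fst).Nodup)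
    (p : (Int × List Char) → Bool) : ((cur.filter p).map Prod.fst).Nodup :=
  ((List.filter_sublist).map Prod.fst).nodup h

theorem pvGroup_items (cur : List (Int × List Char)) (h : (cur.map Prod.fst).Nodup) :
    (pvGroup cur).items
      = (PySem.Set.ofList (cur.map (fun pr => pr.2))).map
          (fun k => (k, ((pvFl cur k).map Prod.fst : PySem.Set Int))) := by
  unfold pvGroup
  rw [pv_foldl_modify_items (fun pr => pr.2) PySem.Set.empty (fun s pr => s.add pr.1) cur]
  apply List.map_congr_left
  intro k _
  simp only [pvFl]
  rw [pv_foldl_add_of_nodup Prod.fst (List.filter (fun x => x.2 == k) cur) (pv_fl_map_fst_nodup cur h _)]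

theorem pv_cnt_count (cur : List (Int × List Char)) (k : List Char) :
    ((cur.map (fun pr => pr.2)).count k : Int) = pvCnt cur k := by
  unfold pvCnt pvFl
  rw [List.count_eq_countP, List.countP_map, List.countP_eq_length_filter]
  rfl

theorem pv_foldl_flatMap {α β γ : Type} (f : α → List β) (g : γ → β → γ) (l : List α) (init : γ) :
    (l.flatMap f).foldl g init = l.foldl (fun a k => (f k).foldl g a) init := by
  induction l generalizing init with
  | nil => rfl
  | cons x xs ih => simp [List.flatMap_cons, List.foldl_append, ih]

theorem pvA_step (toks divide : List (List Char)) (T : Int)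
    (freq : PySem.Dict (List Char) Int) (cur : List (Int × List Char))
    (h : (cur.map Prod.fst).Nodup) :
    (pvGroup cur).items.foldl
      (fun (st : PySem.Dict (List Char) Int × PySem.Dict (List Char) (PySem.Set Int)) kv =>
        if T ≤ PySem.Set.len kv.2 then
          (st.1.insert kv.1 (PySem.Set.len kv.2),
           kv.2.foldl
             (fun i2 pos =>
               if pos + 1 < (toks.length : Int) ∧ PySem.List.pyGetD toks (pos + 1) [] ∉ divide then
                 i2.modify (kv.1 ++ PySem.List.pyGetD toks (pos + 1) []) PySem.Set.empty
                   (fun s => s.add (pos + 1))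
               else i2)
             st.2)
        else st)
      (freq, PySem.Dict.empty)
    = ((PySem.Set.ofList (cur.map (fun pr => pr.2))).foldl
        (fun f k => if T ≤ pvCnt cur k then f.insert k (pvCnt cur k) else f) freq,
       pvGroup (pvNext toks divide T cur)) := by
  rw [pvGroup_items cur h, List.foldl_map]
  have hlen : ∀ k, PySem.Set.len ((pvFl cur k).map Prod.fst : PySem.Set Int) = pvCnt cur k := by
    intro k
    unfold PySem.Set.len pvCnt
    rw [List.length_map]
  -- split the pair fold into two independent folds
  rw [PySem.List.foldl_congr_mem _ _
    (fun st k =>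
      ((if T ≤ pvCnt cur k then st.1.insert k (pvCnt cur k) else st.1),
       (if T ≤ pvCnt cur k then
          ((pvFl cur k).map Prod.fst).foldl
            (fun i2 pos =>
              if pos + 1 < (toks.length : Int) ∧ PySem.List.pyGetD toks (pos + 1) [] ∉ divide then
                i2.modify (k ++ PySem.List.pyGetD toks (pos + 1) []) PySem.Set.empty
                  (fun s => s.add (pos + 1))
              else i2)
            st.2
        else st.2)))
    _ (by
      intro acc k _
      rw [hlen k]
      dsimp only
      by_cases hc : T ≤ pvCnt cur k <;> simp [hc])]
  rw [PySem.List.foldl_prod_mk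
    (fun (f : PySem.Dict (List Char) Int) (k : List Char) =>
      if T ≤ pvCnt cur k then f.insert k (pvCnt cur k) else f)
    (fun (b : PySem.Dict (List Char) (PySem.Set Int)) (k : List Char) =>
      if T ≤ pvCnt cur k then
        ((pvFl cur k).map Prod.fst).foldl
          (fun i2 pos =>
            if pos + 1 < (toks.length : Int) ∧ PySem.List.pyGetD toks (pos + 1) [] ∉ divide then
              i2.modify (k ++ PySem.List.pyGetD toks (pos + 1) []) PySem.Set.empty
                (fun s => s.add (pos + 1))
            else i2)
          b
      else b)
    (PySem.Set.ofList (cur.map (fun pr => pr.2))) freq PySem.Dict.empty]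
  refine Prod.ext rfl ?_
  -- second component: equals pvGroup (pvNext …)
  unfold pvNext pvGroup
  rw [pv_foldl_flatMap]
  apply PySem.List.foldl_congr_mem
  intro b k _
  unfold pvBrs
  split
  · rw [List.foldl_map, List.foldl_map, List.foldl_filter]
    apply PySem.List.foldl_congr_mem
    intro acc pr _
    unfold pvCnd pvExt
    by_cases hc : pr.1 + 1 < (toks.length : Int) ∧ PySem.List.pyGetD toks (pr.1 + 1) [] ∉ divide
    · rw [if_pos hc, if_pos (by simpa using hc)]
    · rw [if_neg hc, if_neg (by simpa using hc)]
  · rfl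

theorem pvNext_nodup (toks divide : List (List Char)) (T : Int) (cur : List (Int × List Char))
    (h : (cur.map Prod.fst).Nodup) :
    ((pvNext toks divide T cur).map Prod.fst).Nodup := by
  unfold pvNext
  rw [List.map_flatMap]
  rw [List.nodup_flatMap]
  have hmem : ∀ k x, x ∈ (pvBrs toks divide T cur k).map Prod.fst →
      ∃ pr ∈ cur, pr.2 = k ∧ x = pr.1 + 1 := by
    intro k x hx
    unfold pvBrs at hx
    split at hx
    · rcases List.mem_map.mp hx with ⟨pr2, hpr2, hx2⟩
      rcases List.mem_map.mp hpr2 with ⟨pr, hpr, rfl⟩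
      have hpr' := List.mem_filter.mp hpr
      have hfl := List.mem_filter.mp hpr'.1
      exact ⟨pr, hfl.1, (beq_iff_eq ..).mp hfl.2, hx2.symm⟩
    · simp at hx
  constructor
  · intro k _
    unfold pvBrs
    split
    · rw [List.map_map]
      have : (Prod.fst ∘ pvExt toks k) = (fun pr : Int × List Char => pr.1 + 1) := rfl
      rw [this]
      have : (fun pr : Int × List Char => pr.1 + 1)
          = ((fun x : Int => x + 1) ∘ Prod.fst) := rfl
      rw [this, ← List.map_map]
      apply List.Nodup.map (add_left_injective 1)
      exact pv_fl_map_fst_nodup _ (pv_fl_map_fst_nodup cur h _) _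
    · simp
  · apply List.Pairwise.imp ?_ (PySem.Set.nodup_ofList (cur.map (fun pr => pr.2)))
    intro k1 k2 hne x hx1 hx2
    rcases hmem k1 x hx1 with ⟨p1, hp1, hk1, hx1'⟩
    rcases hmem k2 x hx2 with ⟨p2, hp2, hk2, hx2'⟩
    have hfst : p1.1 = p2.1 := by omega
    have := List.inj_on_of_nodup_map h hp1 hp2 hfst
    exact hne (by rw [← hk1, this, hk2])


-- the slice-join string of a single position is that token
theorem pvW_one (toks : List (List Char)) (a : Nat) (h : a < toks.length) :
    pvW toks 1 (a : Int) = PySem.List.pyGetD toks (a : Int) [] := by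
  unfold pvW
  have h1 : (a : Int) - 1 + 1 = ((a : Nat) : Int) := by omega
  have h2 : (a : Int) + 1 = ((a + 1 : Nat) : Int) := by omega
  rw [h1, h2, PySem.List.slice_natCast]
  have h3 : a + 1 - a = 1 := by omega
  rw [h3]
  rw [List.drop_eq_getElem_cons h]
  rw [List.take_succ_cons, List.take_zero]
  rw [List.flatten_cons, List.flatten_nil, List.append_nil]
  rw [PySem.List.pyGetD_natCast]
  simp [List.getD, h]

-- extending the slice-join string by one token
theorem pvW_succ (toks : List (List Char)) (L p : Int) (h1 : 1 ≤ L) (h2 : L - 1 ≤ p)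
    (h3 : p + 1 < (toks.length : Int)) :
    pvW toks (L + 1) (p + 1) = pvW toks L p ++ PySem.List.pyGetD toks (p + 1) [] := by
  unfold pvW
  have ha : 0 ≤ p - L + 1 := by omega
  obtain ⟨a, hA⟩ : ∃ a : Nat, (a : Int) = p - L + 1 := ⟨(p - L + 1).toNat, Int.toNat_of_nonneg ha⟩
  obtain ⟨b, hB⟩ : ∃ b : Nat, (b : Int) = p + 1 := ⟨(p + 1).toNat, Int.toNat_of_nonneg (by omega)⟩
  have hAB : a ≤ b := by omega
  have hbn : b < toks.length := by exact_mod_cast hB ▸ h3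
  have e1 : p + 1 - (L + 1) + 1 = (a : Int) := by omega
  have e2 : p + 1 + 1 = ((b + 1 : Nat) : Int) := by omega
  have e3 : p - L + 1 = (a : Int) := by omega
  have e4 : p + 1 = ((b : Nat) : Int) := by omega
  rw [e1, e2, e3, e4, PySem.List.slice_natCast, PySem.List.slice_natCast]
  have e5 : b + 1 - a = (b - a) + 1 := by omega
  rw [e5, List.take_add_one]
  have e6 : (toks.drop a)[b - a]? = some toks[b] := by
    rw [List.getElem?_drop]
    have : a + (b - a) = b := by omega
    rw [this]
    exact List.getElem?_eq_getElem hbn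
  rw [e6]
  rw [List.flatten_append]
  rw [PySem.List.pyGetD_natCast]
  simp [List.getD, hbn]

theorem pv_zip_map_self {α β : Type} (l : List α) (f : α → β) :
    l.zip (l.map f) = l.map (fun x => (x, f x)) := by
  induction l with
  | nil => rfl
  | cons x xs ih => simp [ih]

-- a conditional-insert pass over the keys is the insert fold of the emitted pairs
theorem pv_cond_insert_fold (T : Int) (cnt : List Char → Int) (keys : List (List Char))
    (freq : PySem.Dict (List Char) Int) :
    keys.foldl (fun f k => if T ≤ cnt k then f.insert k (cnt k) else f) freq
      = ((keys.filter (fun k => decide (T ≤ cnt k))).map (fun k => (k, cnt k))).foldl pvIns freq := by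
  rw [PySem.List.foldl_ite_eq_foldl_filter]
  rw [List.foldl_map]
  rfl

-- B's next frontier carries exactly the phrases of A's next index
theorem pvB_next (toks divide : List (List Char)) (T : Int) (alive : List Int) (L : Int)
    (h1 : 1 ≤ L) (hbd : ∀ p ∈ alive, L - 1 ≤ p ∧ p + 1 ≤ (toks.length : Int)) :
    ((PySem.Dict.counter (alive.map (fun p => pvW toks L p))).keys.flatMap
      (fun s =>
        if T ≤ (PySem.Dict.counter (alive.map (fun p => pvW toks L p))).getD s 0 then
          ((alive.zip (alive.map (fun p => pvW toks L p))).filter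
            (fun pw => pw.2 == s && decide (pw.1 + 1 < (toks.length : Int)) &&
                       decide (PySem.List.pyGetD toks (pw.1 + 1) [] ∉ divide))).map
            (fun pw => pw.1 + 1)
        else [])).map (fun p => (p, pvW toks (L + 1) p))
    = pvNext toks divide T (pvCur toks L alive) := by
  have hcur : alive.zip (alive.map (fun p => pvW toks L p)) = pvCur toks L alive :=
    pv_zip_map_self alive _
  have hsnd : (pvCur toks L alive).map (fun pr => pr.2) = alive.map (fun p => pvW toks L p) := by
    unfold pvCur; rw [List.map_map]; rfl
  rw [List.map_flatMap]
  unfold pvNext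
  rw [hsnd, PySem.Dict.keys_counter]
  congr 1
  funext k
  rw [hcur]
  rw [PySem.Dict.getD_counter, ← hsnd, pv_cnt_count]
  unfold pvBrs
  by_cases hk : T ≤ pvCnt (pvCur toks L alive) k
  · rw [if_pos hk, if_pos hk, List.map_map]
    have hff : (pvCur toks L alive).filter
        (fun pw => pw.2 == k && decide (pw.1 + 1 < (toks.length : Int)) &&
                   decide (PySem.List.pyGetD toks (pw.1 + 1) [] ∉ divide))
        = (pvFl (pvCur toks L alive) k).filter (pvCnd toks divide) := by
      unfold pvFl pvCnd
      rw [List.filter_filter]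
      apply List.filter_congr
      intro pr _
      simp only [Bool.decide_and]
      rw [Bool.and_assoc, Bool.and_comm]
    rw [hff]
    apply List.map_congr_left
    intro pr hpr
    have hprC : pr ∈ pvCur toks L alive := by
      have := (List.mem_filter.mp hpr).1
      exact (List.mem_filter.mp this).1
    rcases List.mem_map.mp hprC with ⟨p, hp, rfl⟩
    have hcond := (List.mem_filter.mp hpr).2
    unfold pvCnd at hcond
    have hcond' : p + 1 < (toks.length : Int) ∧ PySem.List.pyGetD toks (p + 1) [] ∉ divide := by
      simpa using hcond
    have hk2 : (List.mem_filter.mp (List.mem_filter.mp hpr).1).2 = (List.mem_filter.mp (List.mem_filter.mp hpr).1).2 := rfl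
    unfold pvExt
    simp only [Function.comp]
    refine Prod.ext rfl ?_
    show pvW toks (L + 1) (p + 1) = _
    rw [pvW_succ toks L p h1 (hbd p hp).1 hcond'.1]
    -- the key equals this position's phrase
    have hkey : pvW toks L p = k := by
      have := (List.mem_filter.mp (List.mem_filter.mp hpr).1).2
      exact (beq_iff_eq ..).mp (by simpa using this)
    rw [hkey]
  · rw [if_neg hk, if_neg hk]
    rfl

-- membership shape of A's next index contents
theorem pvNext_mem (toks divide : List (List Char)) (T : Int) (cur : List (Int × List Char)) :
    ∀ q ∈ pvNext toks divide T cur, ∃ pr ∈ cur, q.1 = pr.1 + 1 ∧ pvCnd toks divide pr = true := by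
  intro q hq
  unfold pvNext at hq
  rcases List.mem_flatMap.mp hq with ⟨k, _, hk⟩
  unfold pvBrs at hk
  split at hk
  · rcases List.mem_map.mp hk with ⟨pr, hpr, rfl⟩
    have h1 := List.mem_filter.mp hpr
    have h2 := List.mem_filter.mp h1.1
    exact ⟨pr, h2.1, rfl, h1.2⟩
  · simp at hk

-- main loop correspondence: A's dict-threaded loop equals the insert-fold of B's emitted pairs
theorem pv_loop_eq (toks divide : List (List Char)) (T : Int) (fuel : Nat) :
    ∀ (pairs : List (List Char × Int)) (alive : List Int) (L : Int),
    alive.Nodup → (∀ p ∈ alive, L - 1 ≤ p ∧ p + 1 ≤ (toks.length : Int)) → 1 ≤ L →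
    pvALoop toks divide T fuel (pairs.foldl pvIns PySem.Dict.empty) (pvGroup (pvCur toks L alive))
      = (pvBLoop toks divide T fuel pairs alive L).foldl pvIns PySem.Dict.empty := by
  induction fuel with
  | zero => intro pairs alive L _ _ _; rfl
  | succ fuel ih =>
    intro pairs alive L hnd hbd hL
    have hfst : (pvCur toks L alive).map Prod.fst = alive := by
      unfold pvCur; rw [List.map_map]; exact List.map_id' _
    have hnd' : ((pvCur toks L alive).map Prod.fst).Nodup := by rw [hfst]; exact hnd
    by_cases halive : alive = []
    · subst halive
      show pvALoop toks divide T (fuel+1) _ (pvGroup (pvCur toks L []))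
          = (pvBLoop toks divide T (fuel+1) pairs [] L).foldl pvIns PySem.Dict.empty
      rw [show pvCur toks L [] = [] from rfl, show pvGroup [] = PySem.Dict.empty from rfl]
      simp [pvALoop, pvBLoop, PySem.Dict.size, PySem.Dict.empty]
    · have hsz : (pvGroup (pvCur toks L alive)).size ≠ 0 := by
        unfold PySem.Dict.size
        rw [pvGroup_items _ hnd']
        simp only [List.length_map, ne_eq, List.length_eq_zero_iff]
        intro hemp
        obtain ⟨p0, rest, rfl⟩ := List.exists_cons_of_ne_nil halive
        have hm : pvW toks L p0
            ∈ PySem.Set.ofList ((pvCur toks L (p0 :: rest)).map (fun pr => pr.2)) :=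
          (PySem.Set.mem_ofList _ _).mpr (by simp [pvCur])
        rw [hemp] at hm
        exact List.not_mem_nil hm
      simp only [pvALoop]
      rw [if_neg hsz]
      rw [pvA_step toks divide T _ (pvCur toks L alive) hnd']
      simp only [pvBLoop]
      rw [if_neg halive]
      -- name B's per-level data
      set ws := alive.map (fun p => pvW toks L p) with hws
      set cnt := PySem.Dict.counter ws with hcnt
      -- identify snd projections with B's string list
      have hsnd : (pvCur toks L alive).map (fun pr => pr.2) = ws := by
        rw [hws]; unfold pvCur; rw [List.map_map]; rfl
      -- B's next frontier
      set alive' := cnt.keys.flatMap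
        (fun s =>
          if T ≤ cnt.getD s 0 then
            ((alive.zip ws).filter
              (fun pw => pw.2 == s && decide (pw.1 + 1 < (toks.length : Int)) &&
                         decide (PySem.List.pyGetD toks (pw.1 + 1) [] ∉ divide))).map
              (fun pw => pw.1 + 1)
          else []) with halive'
      have hnext : pvCur toks (L + 1) alive' = pvNext toks divide T (pvCur toks L alive) := by
        unfold pvCur
        rw [halive', hcnt, hws]
        exact pvB_next toks divide T alive L hL hbd
      -- B's emitted pairs for this level
      set pairs' := cnt.keys.foldl
        (fun ps s => if T ≤ cnt.getD s 0 then ps ++ [(s, cnt.getD s 0)] else ps) pairs with hpairs'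
      have hfreq :
          (PySem.Set.ofList ((pvCur toks L alive).map (fun pr => pr.2))).foldl
            (fun f k => if T ≤ pvCnt (pvCur toks L alive) k
                        then f.insert k (pvCnt (pvCur toks L alive) k) else f)
            (pairs.foldl pvIns PySem.Dict.empty)
          = pairs'.foldl pvIns PySem.Dict.empty := by
        rw [hpairs', hcnt, PySem.Dict.keys_counter, hsnd]
        rw [PySem.List.foldl_congr_mem _ _
          (fun (ps : List (List Char × Int)) s =>
            if T ≤ pvCnt (pvCur toks L alive) s then ps ++ [(s, pvCnt (pvCur toks L alive) s)] else ps)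
          _ (by
            intro acc s _
            rw [PySem.Dict.getD_counter, ← hsnd, pv_cnt_count])]
        rw [PySem.List.foldl_append_ite
          (fun s => T ≤ pvCnt (pvCur toks L alive) s)
          (fun s => (s, pvCnt (pvCur toks L alive) s))]
        rw [List.foldl_append]
        rw [pv_cond_insert_fold T (pvCnt (pvCur toks L alive))]
      rw [hfreq, ← hnext]
      -- invariants for the next round
      have halmap : alive' = (pvNext toks divide T (pvCur toks L alive)).map Prod.fst := by
        have h1 : (pvCur toks (L + 1) alive').map Prod.fst = alive' := by
          unfold pvCur; rw [List.map_map]; exact List.map_id' _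
        rw [← h1, hnext]
      have hnd2 : alive'.Nodup := by
        rw [halmap]
        exact pvNext_nodup toks divide T _ hnd'
      have hbd2 : ∀ p ∈ alive', (L + 1) - 1 ≤ p ∧ p + 1 ≤ (toks.length : Int) := by
        intro p hp
        have hp' : (p, pvW toks (L + 1) p) ∈ pvNext toks divide T (pvCur toks L alive) := by
          rw [← hnext]
          unfold pvCur
          exact List.mem_map_of_mem hp
        rcases pvNext_mem toks divide T _ _ hp' with ⟨pr, hpr, hq1, hcnd⟩
        have hpr1 : pr.1 ∈ alive := by
          rw [← hfst]
          exact List.mem_map_of_mem hpr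
        have hb := hbd pr.1 hpr1
        unfold pvCnd at hcnd
        have hcnd' : pr.1 + 1 < (toks.length : Int) := by
          have := of_decide_eq_true hcnd
          exact this.1
        simp only at hq1
        omega
      exact ih pairs' alive' (L + 1) hnd2 hbd2 (by omega)

-- A's initial index is the grouping of B's initial frontier
theorem pv_init_group (toks divide : List (List Char)) :
    (PySem.List.pyRange 0 (toks.length : Int) 1).foldl
      (fun d i =>
        if PySem.List.pyGetD toks i [] ∉ divide then
          d.modify (PySem.List.pyGetD toks i []) PySem.Set.empty (fun s => s.add i)
        else d)
      PySem.Dict.empty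
    = pvGroup (pvCur toks 1 ((PySem.List.pyRange 0 (toks.length : Int) 1).filter
        (fun p => decide (PySem.List.pyGetD toks p [] ∉ divide)))) := by
  unfold pvGroup pvCur
  rw [List.foldl_map, List.foldl_filter]
  apply PySem.List.foldl_congr_mem
  intro acc i hi
  have hi' : ∃ a : Nat, (a : Int) = i ∧ a < toks.length := by
    rw [PySem.List.pyRange_zero_natCast] at hi
    rcases List.mem_map.mp hi with ⟨a, ha, rfl⟩
    exact ⟨a, rfl, List.mem_range.mp ha⟩
  rcases hi' with ⟨a, rfl, ha⟩
  rw [pvW_one toks a ha]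
  by_cases hc : PySem.List.pyGetD toks (a : Int) [] ∉ divide
  · rw [if_pos hc, if_pos (by simpa using hc)]
  · rw [if_neg hc, if_neg (by simpa using hc)]

theorem pv_init_nodup (toks divide : List (List Char)) :
    ((PySem.List.pyRange 0 (toks.length : Int) 1).filter
        (fun p => decide (PySem.List.pyGetD toks p [] ∉ divide))).Nodup := by
  apply List.Nodup.filter
  rw [PySem.List.pyRange_zero_natCast]
  exact (List.nodup_range).map (fun a b => by exact_mod_cast id)

theorem pv_init_bound (toks divide : List (List Char)) :
    ∀ p ∈ (PySem.List.pyRange 0 (toks.length : Int) 1).filter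
        (fun p => decide (PySem.List.pyGetD toks p [] ∉ divide)),
      (1 : Int) - 1 ≤ p ∧ p + 1 ≤ (toks.length : Int) := by
  intro p hp
  have hp' := (List.mem_filter.mp hp).1
  rw [PySem.List.pyRange_zero_natCast] at hp'
  rcases List.mem_map.mp hp' with ⟨a, ha, rfl⟩
  have := List.mem_range.mp ha
  omega

-- ===== VERDICT (by name: the statement is the Claim_ definition above) =====
theorem FrequentPhraseDetection_spec : Claim_equal_FrequentPhraseDetection := by
  intro Corpus Threshold DivideSet _
  unfold Spec_FrequentPhraseDetection FrequentPhraseDetection FrequentPhraseDetection_alt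
  dsimp only
  rw [pv_init_group (Corpus.map String.toList) (DivideSet.map String.toList)]
  exact congrArg
    (fun d : PySem.Dict (List Char) Int => d.items.map (fun p => (String.ofList p.1, p.2)))
    (pv_loop_eq (Corpus.map String.toList) (DivideSet.map String.toList) Threshold
      ((Corpus.map String.toList).length + 1) [] _ 1
      (pv_init_nodup (Corpus.map String.toList) (DivideSet.map String.toList))
      (pv_init_bound (Corpus.map String.toList) (DivideSet.map String.toList))
      (by omega))
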